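-- pv_equiv track=rewrite | github.com/RazwanSiktany/ckb_textify | ckb_textify/latin.py | _fallback_transliterate
-- ===== SOURCE A (Python) =====
-- MULTI_CHAR_MAP = {
--     "tion": "شن", "ght": "ت", "ph": "ف", "sh": "ش", "ch": "چ",
--     "kh": "خ", "gh": "غ", "th": "س", "zh": "ژ", "oo": "وو",
--     "ee": "ی", "qu": "کو", "ck": "ک",
-- }
--
-- SINGLE_CHAR_MAP = {
--     "a": "ا", "b": "ب", "c": "ک", "d": "د", "e": "ێ", "f": "ف",
--     "g": "گ", "h": "ه", "i": "ی", "j": "ج", "k": "ک", "l": "ل",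
--     "m": "م", "n": "ن", "o": "ۆ", "p": "پ", "q": "ک", "r": "ڕ",
--     "s": "س", "t": "ت", "u": "و", "v": "ڤ", "w": "و", "x": "کس",
--     "y": "ی", "z": "ز",
-- }
--
-- def _fallback_transliterate(word: str) -> str:
--     word = word.lower()
--     result = ""
--
--     # Initial Vowel Rule
--     if word and word[0] in "aeiou":
--         result += "ئ"
--
--     i = 0
--     n = len(word)
--     while i < n:
--         if i + 4 <= n and word[i:i + 4] in MULTI_CHAR_MAP:
--             result += MULTI_CHAR_MAP[word[i:i + 4]]
--             i += 4
--             continue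
--         if i + 3 <= n and word[i:i + 3] in MULTI_CHAR_MAP:
--             result += MULTI_CHAR_MAP[word[i:i + 3]]
--             i += 3
--             continue
--         if i + 2 <= n and word[i:i + 2] in MULTI_CHAR_MAP:
--             result += MULTI_CHAR_MAP[word[i:i + 2]]
--             i += 2
--             continue
--         char = word[i]
--         if char in SINGLE_CHAR_MAP:
--             result += SINGLE_CHAR_MAP[char]
--         else:
--             result += char
--         i += 1
--     return result
-- ===== SOURCE B (Python) =====
-- MULTI_CHAR_MAP = {
--     "tion": "شن", "ght": "ت", "ph": "ف", "sh": "ش", "ch": "چ",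
--     "kh": "خ", "gh": "غ", "th": "س", "zh": "ژ", "oo": "وو",
--     "ee": "ی", "qu": "کو", "ck": "ک",
-- }
--
-- SINGLE_CHAR_MAP = {
--     "a": "ا", "b": "ب", "c": "ک", "d": "د", "e": "ێ", "f": "ف",
--     "g": "گ", "h": "ه", "i": "ی", "j": "ج", "k": "ک", "l": "ل",
--     "m": "م", "n": "ن", "o": "ۆ", "p": "پ", "q": "ک", "r": "ڕ",
--     "s": "س", "t": "ت", "u": "و", "v": "ڤ", "w": "و", "x": "کس",
--     "y": "ی", "z": "ز",
-- }
--
--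
-- def _build_trie():
--     # Flat prefix tree: node = [value-or-None, list of (char, child index)], root at 0.
--     nodes = [[None, []]]
--     for key, val in {**MULTI_CHAR_MAP, **SINGLE_CHAR_MAP}.items():
--         cur = 0
--         for ch in key:
--             nxt = None
--             for c2, t in nodes[cur][1]:
--                 if c2 == ch:
--                     nxt = t
--                     break
--             if nxt is None:
--                 nodes.append([None, []])
--                 nodes[cur][1].append((ch, len(nodes) - 1))
--                 nxt = len(nodes) - 1
--             cur = nxt
--         nodes[cur][0] = val
--     return nodes
--
--
-- _TRIE = _build_trie()
--
--
-- def _fallback_transliterate(word: str) -> str: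
--     word = word.lower()
--     out = []
--     if word and word[0] in "aeiou":
--         out.append("ئ")
--     i, n = 0, len(word)
--     while i < n:
--         # Walk the trie from position i, remembering the last accepting node.
--         cur, j = 0, i
--         best = None  # (value, end position) of longest key matched so far
--         while j < n:
--             ch = word[j]
--             nxt = None
--             for c2, t in _TRIE[cur][1]:
--                 if c2 == ch:
--                     nxt = t
--                     break
--             if nxt is None:
--                 break
--             cur = nxt
--             j += 1
--             if _TRIE[cur][0] is not None:
--                 best = (_TRIE[cur][0], j)
--         if best is None:
--             out.append(word[i])
--             i += 1
--         else:
--             out.append(best[0])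
--             i = best[1]
--     return "".join(out)
-- ===== Notes on version B (the rewrite author's own statement) =====
-- stated objective: alternative
-- what changed: A's per-position cascade of length-4/3/2 slice probes into MULTI_CHAR_MAP plus a SINGLE_CHAR_MAP lookup is replaced by a prefix-tree automaton: all spellings are compiled once into a flat trie and the word is scanned by walking the trie char by char, keeping the last accepting node (longest match).
import Mathlib
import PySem

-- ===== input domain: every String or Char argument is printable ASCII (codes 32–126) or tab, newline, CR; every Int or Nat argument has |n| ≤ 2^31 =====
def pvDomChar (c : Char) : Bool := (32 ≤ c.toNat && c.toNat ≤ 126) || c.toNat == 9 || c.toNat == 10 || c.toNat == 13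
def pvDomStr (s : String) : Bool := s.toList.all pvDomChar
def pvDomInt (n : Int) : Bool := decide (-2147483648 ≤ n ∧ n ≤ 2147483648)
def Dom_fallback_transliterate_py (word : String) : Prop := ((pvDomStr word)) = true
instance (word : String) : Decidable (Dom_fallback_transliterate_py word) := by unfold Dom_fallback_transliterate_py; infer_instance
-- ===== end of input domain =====

set_option maxRecDepth 1000000

-- B replaces A's hard-coded per-position cascade of length-4/3/2 slice probes into two dicts
-- by a prefix-tree automaton: all spellings are compiled once into a flat trie and the word is
-- scanned by walking the trie char by char, keeping the last accepting node (objective: alternative).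

-- ===== PORT A =====
-- MULTI_CHAR_MAP / SINGLE_CHAR_MAP with keys and values as code-point lists
def MULTI : PySem.Dict (List Char) (List Char) := PySem.Dict.ofList
  [(['t', 'i', 'o', 'n'], ['ش', 'ن']),
   (['g', 'h', 't'], ['ت']),
   (['p', 'h'], ['ف']),
   (['s', 'h'], ['ش']),
   (['c', 'h'], ['چ']),
   (['k', 'h'], ['خ']),
   (['g', 'h'], ['غ']),
   (['t', 'h'], ['س']),
   (['z', 'h'], ['ژ']),
   (['o', 'o'], ['و', 'و']),
   (['e', 'e'], ['ی']),
   (['q', 'u'], ['ک', 'و']),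
   (['c', 'k'], ['ک'])]

def SINGLE : PySem.Dict (List Char) (List Char) := PySem.Dict.ofList
  [(['a'], ['ا']), (['b'], ['ب']), (['c'], ['ک']), (['d'], ['د']), (['e'], ['ێ']), (['f'], ['ف']),
   (['g'], ['گ']), (['h'], ['ه']), (['i'], ['ی']), (['j'], ['ج']), (['k'], ['ک']), (['l'], ['ل']),
   (['m'], ['م']), (['n'], ['ن']), (['o'], ['ۆ']), (['p'], ['پ']), (['q'], ['ک']), (['r'], ['ڕ']),
   (['s'], ['س']), (['t'], ['ت']), (['u'], ['و']), (['v'], ['ڤ']), (['w'], ['و']), (['x'], ['ک', 'س']),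
   (['y'], ['ی']), (['z'], ['ز'])]

-- A's while-loop over the index i, transcribed as structural recursion on the suffix
-- word[i:]; word[i:i+k] is (rest.take k) and the 'i + k <= n' guards are 'k ≤ rest.length'.
def aLoop (rest : List Char) : List Char :=
  match rest with
  | [] => []
  | c :: cs =>
    match (if 4 ≤ (c :: cs).length then MULTI.get? ((c :: cs).take 4) else none) with
    | some v => v ++ aLoop ((c :: cs).drop 4)
    | none =>
      match (if 3 ≤ (c :: cs).length then MULTI.get? ((c :: cs).take 3) else none) with
      | some v => v ++ aLoop ((c :: cs).drop 3)
      | none =>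
        match (if 2 ≤ (c :: cs).length then MULTI.get? ((c :: cs).take 2) else none) with
        | some v => v ++ aLoop ((c :: cs).drop 2)
        | none =>
          match SINGLE.get? [c] with
          | some v => v ++ aLoop cs
          | none => c :: aLoop cs
termination_by rest.length
decreasing_by all_goals simp

def fallback_transliterate_py (word : String) : String :=
  let w := (PySem.Str.lower word).toList
  let init : List Char :=
    match w with
    | [] => []
    | c :: _ => if PySem.Chars.isIn [c] "aeiou".toList then "ئ".toList else []
  String.ofList (init ++ aLoop w)


-- ===== PORT B =====
-- B builds a flat prefix tree (trie) of all spellings once and then scans the word by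
-- walking the trie char by char, remembering the last accepting node (longest match).

-- Source B's {**MULTI_CHAR_MAP, **SINGLE_CHAR_MAP} (dict merge, insertion order)
def COMBINED : PySem.Dict (List Char) (List Char) := MULTI.update SINGLE.items

-- port of Source B's _build_trie inner loop: insert one key into the flat node list;
-- a node is (value?, transitions); Source B's list mutations become functional updates
def trieAddKey (nodes : List (Option (List Char) × List (Char × Nat))) (key : List Char)
    (val : List Char) : List (Option (List Char) × List (Char × Nat)) :=
  let st := key.foldl (fun (st : List (Option (List Char) × List (Char × Nat)) × Nat) ch =>
      match (st.1.getD st.2 (none, [])).2.find? (fun p => p.1 == ch) with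
      | some p => (st.1, p.2)
      | none =>
        let nodes' := st.1 ++ [(none, [])]
        let idx := nodes'.length - 1
        (nodes'.modify st.2 (fun nd => (nd.1, nd.2 ++ [(ch, idx)])), idx))
    (nodes, 0)
  st.1.modify st.2 (fun nd => (some val, nd.2))

-- Source B's _TRIE = _build_trie(): fold the key insertion over the merged map's items
def TRIE : List (Option (List Char) × List (Char × Nat)) :=
  COMBINED.items.foldl (fun nodes kv => trieAddKey nodes kv.1 kv.2) [(none, [])]

-- Source B's inner while-loop: walk the trie from the current position (rest), carrying the
-- consumed count k and the best (value, length) seen; node indices are always in range,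
-- so _TRIE[cur] is List.getD (exact here: the default is never reached)
def walkB (cur : Nat) (rest : List Char) (k : Nat) (best : Option (List Char × Nat)) :
    Option (List Char × Nat) :=
  match rest with
  | [] => best
  | ch :: rs =>
    match (TRIE.getD cur (none, [])).2.find? (fun p => p.1 == ch) with
    | none => best
    | some p =>
      match (TRIE.getD p.2 (none, [])).1 with
      | some v => walkB p.2 rs (k + 1) (some (v, k + 1))
      | none => walkB p.2 rs (k + 1) best

-- needed by bLoop's termination proof: a successful walk consumed at least one char
theorem walkB_pos : ∀ (rest : List Char) (cur k : Nat) (best : Option (List Char × Nat))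
    (v : List Char) (k' : Nat), walkB cur rest k best = some (v, k') → best = some (v, k') ∨ k < k' := by
  intro rest
  induction rest with
  | nil => intro cur k best v k' h; simp only [walkB] at h; exact Or.inl h
  | cons ch rs ih =>
    intro cur k best v k' h
    simp only [walkB] at h
    split at h
    · exact Or.inl h
    · split at h
      · rcases ih _ _ _ _ _ h with h' | h'
        · cases h'; right; omega
        · right; omega
      · rcases ih _ _ _ _ _ h with h' | h'
        · exact Or.inl h'
        · right; omega

-- Source B's outer while-loop: at each position take the walk's best match, else the literal char
def bLoop (rest : List Char) : List Char :=
  match rest with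
  | [] => []
  | c :: cs =>
    match hw : walkB 0 (c :: cs) 0 none with
    | none => c :: bLoop cs
    | some vk => vk.1 ++ bLoop ((c :: cs).drop vk.2)
termination_by rest.length
decreasing_by
  · simp
  · rcases walkB_pos (c :: cs) 0 0 none vk.1 vk.2 (by rw [hw]) with h | h
    · simp at h
    · simp only [List.length_drop, List.length_cons]
      omega

def fallback_transliterate_py_alt (word : String) : String :=
  let w := (PySem.Str.lower word).toList
  let out0 : List Char :=
    match w with
    | [] => []
    | c :: _ => if PySem.Chars.isIn [c] "aeiou".toList then "ئ".toList else []
  String.ofList (out0 ++ bLoop w)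


-- ===== PRECONDITION & SPEC =====
def Spec_fallback_transliterate_py (word : String) (out : String) : Prop := out = fallback_transliterate_py_alt word
instance (word : String) (out : String) : Decidable (Spec_fallback_transliterate_py word out) := by unfold Spec_fallback_transliterate_py; infer_instance

-- ===== CLAIM (what is proved, stated in full; the proofs are below) =====
def Claim_equal_fallback_transliterate_py : Prop := ∀ (word : String), Dom_fallback_transliterate_py word → Spec_fallback_transliterate_py word (fallback_transliterate_py word)


-- ===== LEMMAS AND PROOFS =====

-- the value of TRIE, computed once (all trie facts below follow from it by decide)
def TRIELIT : List (Option (List Char) × List (Char × Nat)) :=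
  [(none, [('t', 1), ('g', 5), ('p', 8), ('s', 10), ('c', 12), ('k', 14), ('z', 17), ('o', 19), ('e', 21), ('q', 23), ('a', 26), ('b', 27), ('d', 28), ('f', 29), ('h', 30), ('i', 31), ('j', 32), ('l', 33), ('m', 34), ('n', 35), ('r', 36), ('u', 37), ('v', 38), ('w', 39), ('x', 40), ('y', 41)]),
   (some ['ت'], [('i', 2), ('h', 16)]),
   (none, [('o', 3)]),
   (none, [('n', 4)]),
   (some ['ش', 'ن'], []),
   (some ['گ'], [('h', 6)]),
   (some ['غ'], [('t', 7)]),
   (some ['ت'], []),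
   (some ['پ'], [('h', 9)]),
   (some ['ف'], []),
   (some ['س'], [('h', 11)]),
   (some ['ش'], []),
   (some ['ک'], [('h', 13), ('k', 25)]),
   (some ['چ'], []),
   (some ['ک'], [('h', 15)]),
   (some ['خ'], []),
   (some ['س'], []),
   (some ['ز'], [('h', 18)]),
   (some ['ژ'], []),
   (some ['ۆ'], [('o', 20)]),
   (some ['و', 'و'], []),
   (some ['ێ'], [('e', 22)]),
   (some ['ی'], []),
   (some ['ک'], [('u', 24)]),
   (some ['ک', 'و'], []),
   (some ['ک'], []),
   (some ['ا'], []),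
   (some ['ب'], []),
   (some ['د'], []),
   (some ['ف'], []),
   (some ['ه'], []),
   (some ['ی'], []),
   (some ['ج'], []),
   (some ['ل'], []),
   (some ['م'], []),
   (some ['ن'], []),
   (some ['ڕ'], []),
   (some ['و'], []),
   (some ['ڤ'], []),
   (some ['و'], []),
   (some ['ک', 'س'], []),
   (some ['ی'], [])]

theorem TRIE_eq : TRIE = TRIELIT := by decide

theorem walkB_nil (cur k : Nat) (best : Option (List Char × Nat)) : walkB cur [] k best = best := by
  simp only [walkB]

theorem walkB_stop (cur : Nat) (ch : Char) (rs : List Char) (k : Nat) (best : Option (List Char × Nat))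
    (h : (TRIE.getD cur (none, [])).2.find? (fun p => p.1 == ch) = none) :
    walkB cur (ch :: rs) k best = best := by
  simp only [walkB, h]

theorem walkB_adv_val (cur : Nat) (ch ch' : Char) (nx : Nat) (v : List Char) (rs : List Char) (k : Nat)
    (best : Option (List Char × Nat))
    (h1 : (TRIE.getD cur (none, [])).2.find? (fun p => p.1 == ch) = some (ch', nx))
    (h2 : (TRIE.getD nx (none, [])).1 = some v) :
    walkB cur (ch :: rs) k best = walkB nx rs (k + 1) (some (v, k + 1)) := by
  simp only [walkB, h1, h2]

theorem walkB_adv_noval (cur : Nat) (ch ch' : Char) (nx : Nat) (rs : List Char) (k : Nat)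
    (best : Option (List Char × Nat))
    (h1 : (TRIE.getD cur (none, [])).2.find? (fun p => p.1 == ch) = some (ch', nx))
    (h2 : (TRIE.getD nx (none, [])).1 = none) :
    walkB cur (ch :: rs) k best = walkB nx rs (k + 1) best := by
  simp only [walkB, h1, h2]

theorem walkB_nochild (cur : Nat) (h : (TRIE.getD cur (none, [])).2 = []) :
    ∀ (rest : List Char) (k : Nat) (best : Option (List Char × Nat)), walkB cur rest k best = best := by
  intro rest k best
  cases rest with
  | nil => simp only [walkB]
  | cons ch rs => simp only [walkB, h, List.find?]

theorem aLoop_nil : aLoop [] = [] := by rw [aLoop]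
theorem bLoop_nil : bLoop [] = [] := by rw [bLoop]

theorem bLoop_cons (c : Char) (cs : List Char) :
    bLoop (c :: cs) = (match walkB 0 (c :: cs) 0 none with
      | none => c :: bLoop cs
      | some vk => vk.1 ++ bLoop ((c :: cs).drop vk.2)) := by
  rw [bLoop]
  split
  · rename_i hf
    rw [hf]
  · rename_i vk hf
    rw [hf]


theorem MULTI_mk : MULTI = PySem.Dict.mk
  [(['t', 'i', 'o', 'n'], ['ش', 'ن']), (['g', 'h', 't'], ['ت']), (['p', 'h'], ['ف']), (['s', 'h'], ['ش']), (['c', 'h'], ['چ']), (['k', 'h'], ['خ']), (['g', 'h'], ['غ']), (['t', 'h'], ['س']), (['z', 'h'], ['ژ']), (['o', 'o'], ['و', 'و']), (['e', 'e'], ['ی']), (['q', 'u'], ['ک', 'و']), (['c', 'k'], ['ک'])] := by decide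

theorem SINGLE_mk : SINGLE = PySem.Dict.mk
  [(['a'], ['ا']), (['b'], ['ب']), (['c'], ['ک']), (['d'], ['د']), (['e'], ['ێ']), (['f'], ['ف']), (['g'], ['گ']), (['h'], ['ه']), (['i'], ['ی']), (['j'], ['ج']), (['k'], ['ک']), (['l'], ['ل']), (['m'], ['م']), (['n'], ['ن']), (['o'], ['ۆ']), (['p'], ['پ']), (['q'], ['ک']), (['r'], ['ڕ']), (['s'], ['س']), (['t'], ['ت']), (['u'], ['و']), (['v'], ['ڤ']), (['w'], ['و']), (['x'], ['ک', 'س']), (['y'], ['ی']), (['z'], ['ز'])] := by decide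

theorem startswith_single_iff (c : Char) (cs : List Char) (x : Char) :
    PySem.Chars.startswith (c :: cs) [x] = true ↔ x = c := by
  rw [PySem.Chars.startswith_iff]
  simp [List.cons_prefix_cons]

set_option maxHeartbeats 2000000 in
theorem get4_none (m : List Char) (hm : m.length = 4) (h0 : ¬ (['t', 'i', 'o', 'n'] <+: m)) :
    MULTI.get? m = none := by
  rcases m with _ | ⟨a1, _ | ⟨a2, _ | ⟨a3, _ | ⟨a4, _ | ⟨a5, m⟩⟩⟩⟩⟩ <;> simp at hm
  simp only [List.cons_prefix_cons, List.nil_prefix, and_true] at h0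
  simp only [MULTI_mk, PySem.Dict.get?_mk_cons]
  simp only [beq_iff_eq, List.cons.injEq, and_true, reduceCtorEq, and_false, if_false]
  split_ifs
  rfl

set_option maxHeartbeats 2000000 in
theorem get3_none (m : List Char) (hm : m.length = 3) (h0 : ¬ (['g', 'h', 't'] <+: m)) :
    MULTI.get? m = none := by
  rcases m with _ | ⟨a1, _ | ⟨a2, _ | ⟨a3, _ | ⟨a4, m⟩⟩⟩⟩ <;> simp at hm
  simp only [List.cons_prefix_cons, List.nil_prefix, and_true] at h0
  simp only [MULTI_mk, PySem.Dict.get?_mk_cons]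
  simp only [beq_iff_eq, List.cons.injEq, and_true, List.cons_ne_nil, reduceCtorEq, and_false, if_false]
  split_ifs
  rfl

set_option maxHeartbeats 2000000 in
theorem get2_none (m : List Char) (hm : m.length = 2) (h0 : ¬ (['p', 'h'] <+: m)) (h1 : ¬ (['s', 'h'] <+: m)) (h2 : ¬ (['c', 'h'] <+: m)) (h3 : ¬ (['k', 'h'] <+: m)) (h4 : ¬ (['g', 'h'] <+: m)) (h5 : ¬ (['t', 'h'] <+: m)) (h6 : ¬ (['z', 'h'] <+: m)) (h7 : ¬ (['o', 'o'] <+: m)) (h8 : ¬ (['e', 'e'] <+: m)) (h9 : ¬ (['q', 'u'] <+: m)) (h10 : ¬ (['c', 'k'] <+: m)) :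
    MULTI.get? m = none := by
  rcases m with _ | ⟨a1, _ | ⟨a2, _ | ⟨a3, m⟩⟩⟩ <;> simp at hm
  simp only [List.cons_prefix_cons, List.nil_prefix, and_true] at h0 h1 h2 h3 h4 h5 h6 h7 h8 h9 h10
  simp only [MULTI_mk, PySem.Dict.get?_mk_cons]
  simp only [beq_iff_eq, List.cons.injEq, and_true, List.cons_ne_nil, and_false, if_false]
  split_ifs
  rfl

theorem scrut4_none (l : List Char) (h0 : ¬ PySem.Chars.startswith l ['t', 'i', 'o', 'n'] = true) :
    (if 4 ≤ l.length then MULTI.get? (l.take 4) else none) = none := by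
  by_cases hl : 4 ≤ l.length
  · rw [if_pos hl]
    refine get4_none _ (by simp [List.length_take]; omega) ?_
    · intro hp
      exact h0 ((PySem.Chars.startswith_iff _ _).mpr (hp.trans (List.take_prefix _ _)))
  · exact if_neg hl

theorem scrut3_none (l : List Char) (h0 : ¬ PySem.Chars.startswith l ['g', 'h', 't'] = true) :
    (if 3 ≤ l.length then MULTI.get? (l.take 3) else none) = none := by
  by_cases hl : 3 ≤ l.length
  · rw [if_pos hl]
    refine get3_none _ (by simp [List.length_take]; omega) ?_
    · intro hp
      exact h0 ((PySem.Chars.startswith_iff _ _).mpr (hp.trans (List.take_prefix _ _)))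
  · exact if_neg hl

theorem scrut2_none (l : List Char) (h0 : ¬ PySem.Chars.startswith l ['p', 'h'] = true) (h1 : ¬ PySem.Chars.startswith l ['s', 'h'] = true) (h2 : ¬ PySem.Chars.startswith l ['c', 'h'] = true) (h3 : ¬ PySem.Chars.startswith l ['k', 'h'] = true) (h4 : ¬ PySem.Chars.startswith l ['g', 'h'] = true) (h5 : ¬ PySem.Chars.startswith l ['t', 'h'] = true) (h6 : ¬ PySem.Chars.startswith l ['z', 'h'] = true) (h7 : ¬ PySem.Chars.startswith l ['o', 'o'] = true) (h8 : ¬ PySem.Chars.startswith l ['e', 'e'] = true) (h9 : ¬ PySem.Chars.startswith l ['q', 'u'] = true) (h10 : ¬ PySem.Chars.startswith l ['c', 'k'] = true) :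
    (if 2 ≤ l.length then MULTI.get? (l.take 2) else none) = none := by
  by_cases hl : 2 ≤ l.length
  · rw [if_pos hl]
    refine get2_none _ (by simp [List.length_take]; omega) ?_ ?_ ?_ ?_ ?_ ?_ ?_ ?_ ?_ ?_ ?_
    · intro hp
      exact h0 ((PySem.Chars.startswith_iff _ _).mpr (hp.trans (List.take_prefix _ _)))
    · intro hp
      exact h1 ((PySem.Chars.startswith_iff _ _).mpr (hp.trans (List.take_prefix _ _)))
    · intro hp
      exact h2 ((PySem.Chars.startswith_iff _ _).mpr (hp.trans (List.take_prefix _ _)))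
    · intro hp
      exact h3 ((PySem.Chars.startswith_iff _ _).mpr (hp.trans (List.take_prefix _ _)))
    · intro hp
      exact h4 ((PySem.Chars.startswith_iff _ _).mpr (hp.trans (List.take_prefix _ _)))
    · intro hp
      exact h5 ((PySem.Chars.startswith_iff _ _).mpr (hp.trans (List.take_prefix _ _)))
    · intro hp
      exact h6 ((PySem.Chars.startswith_iff _ _).mpr (hp.trans (List.take_prefix _ _)))
    · intro hp
      exact h7 ((PySem.Chars.startswith_iff _ _).mpr (hp.trans (List.take_prefix _ _)))
    · intro hp
      exact h8 ((PySem.Chars.startswith_iff _ _).mpr (hp.trans (List.take_prefix _ _)))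
    · intro hp
      exact h9 ((PySem.Chars.startswith_iff _ _).mpr (hp.trans (List.take_prefix _ _)))
    · intro hp
      exact h10 ((PySem.Chars.startswith_iff _ _).mpr (hp.trans (List.take_prefix _ _)))
  · exact if_neg hl

set_option maxHeartbeats 2000000 in
theorem single_none (c : Char) (h0 : ('a' : Char) ≠ c) (h1 : ('b' : Char) ≠ c) (h2 : ('c' : Char) ≠ c) (h3 : ('d' : Char) ≠ c) (h4 : ('e' : Char) ≠ c) (h5 : ('f' : Char) ≠ c) (h6 : ('g' : Char) ≠ c) (h7 : ('h' : Char) ≠ c) (h8 : ('i' : Char) ≠ c) (h9 : ('j' : Char) ≠ c) (h10 : ('k' : Char) ≠ c) (h11 : ('l' : Char) ≠ c) (h12 : ('m' : Char) ≠ c) (h13 : ('n' : Char) ≠ c) (h14 : ('o' : Char) ≠ c) (h15 : ('p' : Char) ≠ c) (h16 : ('q' : Char) ≠ c) (h17 : ('r' : Char) ≠ c) (h18 : ('s' : Char) ≠ c) (h19 : ('t' : Char) ≠ c) (h20 : ('u' : Char) ≠ c) (h21 : ('v' : Char) ≠ c) (h22 : ('w' : Char) ≠ c) (h23 : ('x'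 : Char) ≠ c) (h24 : ('y' : Char) ≠ c) (h25 : ('z' : Char) ≠ c) :
    SINGLE.get? [c] = none := by
  simp only [SINGLE_mk, PySem.Dict.get?_mk_cons]
  simp only [beq_iff_eq, List.cons.injEq, and_true]
  split_ifs <;> first | rfl | tauto

theorem walk_tion (rs : List Char) : walkB 0 ('t'::'i'::'o'::'n'::rs) 0 none = some (['ش', 'ن'], 4) := by
  rw [walkB_adv_val 0 't' 't' 1 ['ت'] _ _ _ (by rw [TRIE_eq]; decide) (by rw [TRIE_eq]; decide)]
  rw [walkB_adv_noval 1 'i' 'i' 2 _ _ _ (by rw [TRIE_eq]; decide) (by rw [TRIE_eq]; decide)]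
  rw [walkB_adv_noval 2 'o' 'o' 3 _ _ _ (by rw [TRIE_eq]; decide) (by rw [TRIE_eq]; decide)]
  rw [walkB_adv_val 3 'n' 'n' 4 ['ش', 'ن'] _ _ _ (by rw [TRIE_eq]; decide) (by rw [TRIE_eq]; decide)]
  exact walkB_nochild 4 (by rw [TRIE_eq]; decide) rs 4 _

theorem walk_ght (rs : List Char) : walkB 0 ('g'::'h'::'t'::rs) 0 none = some (['ت'], 3) := by
  rw [walkB_adv_val 0 'g' 'g' 5 ['گ'] _ _ _ (by rw [TRIE_eq]; decide) (by rw [TRIE_eq]; decide)]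
  rw [walkB_adv_val 5 'h' 'h' 6 ['غ'] _ _ _ (by rw [TRIE_eq]; decide) (by rw [TRIE_eq]; decide)]
  rw [walkB_adv_val 6 't' 't' 7 ['ت'] _ _ _ (by rw [TRIE_eq]; decide) (by rw [TRIE_eq]; decide)]
  exact walkB_nochild 7 (by rw [TRIE_eq]; decide) rs 3 _

theorem walk_ph (rs : List Char) : walkB 0 ('p'::'h'::rs) 0 none = some (['ف'], 2) := by
  rw [walkB_adv_val 0 'p' 'p' 8 ['پ'] _ _ _ (by rw [TRIE_eq]; decide) (by rw [TRIE_eq]; decide)]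
  rw [walkB_adv_val 8 'h' 'h' 9 ['ف'] _ _ _ (by rw [TRIE_eq]; decide) (by rw [TRIE_eq]; decide)]
  exact walkB_nochild 9 (by rw [TRIE_eq]; decide) rs 2 _

theorem walk_sh (rs : List Char) : walkB 0 ('s'::'h'::rs) 0 none = some (['ش'], 2) := by
  rw [walkB_adv_val 0 's' 's' 10 ['س'] _ _ _ (by rw [TRIE_eq]; decide) (by rw [TRIE_eq]; decide)]
  rw [walkB_adv_val 10 'h' 'h' 11 ['ش'] _ _ _ (by rw [TRIE_eq]; decide) (by rw [TRIE_eq]; decide)]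
  exact walkB_nochild 11 (by rw [TRIE_eq]; decide) rs 2 _

theorem walk_ch (rs : List Char) : walkB 0 ('c'::'h'::rs) 0 none = some (['چ'], 2) := by
  rw [walkB_adv_val 0 'c' 'c' 12 ['ک'] _ _ _ (by rw [TRIE_eq]; decide) (by rw [TRIE_eq]; decide)]
  rw [walkB_adv_val 12 'h' 'h' 13 ['چ'] _ _ _ (by rw [TRIE_eq]; decide) (by rw [TRIE_eq]; decide)]
  exact walkB_nochild 13 (by rw [TRIE_eq]; decide) rs 2 _

theorem walk_kh (rs : List Char) : walkB 0 ('k'::'h'::rs) 0 none = some (['خ'], 2) := by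
  rw [walkB_adv_val 0 'k' 'k' 14 ['ک'] _ _ _ (by rw [TRIE_eq]; decide) (by rw [TRIE_eq]; decide)]
  rw [walkB_adv_val 14 'h' 'h' 15 ['خ'] _ _ _ (by rw [TRIE_eq]; decide) (by rw [TRIE_eq]; decide)]
  exact walkB_nochild 15 (by rw [TRIE_eq]; decide) rs 2 _

theorem walk_gh (rs : List Char) (hx : ¬ PySem.Chars.startswith ('g'::'h'::rs) ['g', 'h', 't'] = true) :
    walkB 0 ('g'::'h'::rs) 0 none = some (['غ'], 2) := by
  rw [walkB_adv_val 0 'g' 'g' 5 ['گ'] _ _ _ (by rw [TRIE_eq]; decide) (by rw [TRIE_eq]; decide)]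
  rw [walkB_adv_val 5 'h' 'h' 6 ['غ'] _ _ _ (by rw [TRIE_eq]; decide) (by rw [TRIE_eq]; decide)]
  cases rs with
  | nil => exact walkB_nil _ _ _
  | cons r rs2 =>
    have hr : (('t' : Char) == r) = false := by
      refine beq_eq_false_iff_ne.mpr (fun e => hx ?_)
      rw [← e]
      exact (PySem.Chars.startswith_iff _ _).mpr ⟨rs2, rfl⟩
    refine walkB_stop _ _ _ _ _ ?_
    rw [show (TRIE.getD 6 (none, [])).2 = [('t', 7)] from by rw [TRIE_eq]; decide]
    simp [List.find?, hr]

theorem walk_th (rs : List Char) : walkB 0 ('t'::'h'::rs) 0 none = some (['س'], 2) := by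
  rw [walkB_adv_val 0 't' 't' 1 ['ت'] _ _ _ (by rw [TRIE_eq]; decide) (by rw [TRIE_eq]; decide)]
  rw [walkB_adv_val 1 'h' 'h' 16 ['س'] _ _ _ (by rw [TRIE_eq]; decide) (by rw [TRIE_eq]; decide)]
  exact walkB_nochild 16 (by rw [TRIE_eq]; decide) rs 2 _

theorem walk_zh (rs : List Char) : walkB 0 ('z'::'h'::rs) 0 none = some (['ژ'], 2) := by
  rw [walkB_adv_val 0 'z' 'z' 17 ['ز'] _ _ _ (by rw [TRIE_eq]; decide) (by rw [TRIE_eq]; decide)]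
  rw [walkB_adv_val 17 'h' 'h' 18 ['ژ'] _ _ _ (by rw [TRIE_eq]; decide) (by rw [TRIE_eq]; decide)]
  exact walkB_nochild 18 (by rw [TRIE_eq]; decide) rs 2 _

theorem walk_oo (rs : List Char) : walkB 0 ('o'::'o'::rs) 0 none = some (['و', 'و'], 2) := by
  rw [walkB_adv_val 0 'o' 'o' 19 ['ۆ'] _ _ _ (by rw [TRIE_eq]; decide) (by rw [TRIE_eq]; decide)]
  rw [walkB_adv_val 19 'o' 'o' 20 ['و', 'و'] _ _ _ (by rw [TRIE_eq]; decide) (by rw [TRIE_eq]; decide)]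
  exact walkB_nochild 20 (by rw [TRIE_eq]; decide) rs 2 _

theorem walk_ee (rs : List Char) : walkB 0 ('e'::'e'::rs) 0 none = some (['ی'], 2) := by
  rw [walkB_adv_val 0 'e' 'e' 21 ['ێ'] _ _ _ (by rw [TRIE_eq]; decide) (by rw [TRIE_eq]; decide)]
  rw [walkB_adv_val 21 'e' 'e' 22 ['ی'] _ _ _ (by rw [TRIE_eq]; decide) (by rw [TRIE_eq]; decide)]
  exact walkB_nochild 22 (by rw [TRIE_eq]; decide) rs 2 _

theorem walk_qu (rs : List Char) : walkB 0 ('q'::'u'::rs) 0 none = some (['ک', 'و'], 2) := by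
  rw [walkB_adv_val 0 'q' 'q' 23 ['ک'] _ _ _ (by rw [TRIE_eq]; decide) (by rw [TRIE_eq]; decide)]
  rw [walkB_adv_val 23 'u' 'u' 24 ['ک', 'و'] _ _ _ (by rw [TRIE_eq]; decide) (by rw [TRIE_eq]; decide)]
  exact walkB_nochild 24 (by rw [TRIE_eq]; decide) rs 2 _

theorem walk_ck (rs : List Char) : walkB 0 ('c'::'k'::rs) 0 none = some (['ک'], 2) := by
  rw [walkB_adv_val 0 'c' 'c' 12 ['ک'] _ _ _ (by rw [TRIE_eq]; decide) (by rw [TRIE_eq]; decide)]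
  rw [walkB_adv_val 12 'k' 'k' 25 ['ک'] _ _ _ (by rw [TRIE_eq]; decide) (by rw [TRIE_eq]; decide)]
  exact walkB_nochild 25 (by rw [TRIE_eq]; decide) rs 2 _

theorem walk_a (rs : List Char) : walkB 0 ('a'::rs) 0 none = some (['ا'], 1) := by
  rw [walkB_adv_val 0 'a' 'a' 26 ['ا'] _ _ _ (by rw [TRIE_eq]; decide) (by rw [TRIE_eq]; decide)]
  exact walkB_nochild 26 (by rw [TRIE_eq]; decide) rs 1 _

theorem walk_b (rs : List Char) : walkB 0 ('b'::rs) 0 none = some (['ب'], 1) := by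
  rw [walkB_adv_val 0 'b' 'b' 27 ['ب'] _ _ _ (by rw [TRIE_eq]; decide) (by rw [TRIE_eq]; decide)]
  exact walkB_nochild 27 (by rw [TRIE_eq]; decide) rs 1 _

theorem walk_c (rs : List Char) (hx1 : ¬ PySem.Chars.startswith ('c'::rs) ['c', 'h'] = true) (hx2 : ¬ PySem.Chars.startswith ('c'::rs) ['c', 'k'] = true) :
    walkB 0 ('c'::rs) 0 none = some (['ک'], 1) := by
  rw [walkB_adv_val 0 'c' 'c' 12 ['ک'] _ _ _ (by rw [TRIE_eq]; decide) (by rw [TRIE_eq]; decide)]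
  cases rs with
  | nil => exact walkB_nil _ _ _
  | cons r rs2 =>
    have hr1 : (('h' : Char) == r) = false := by
      refine beq_eq_false_iff_ne.mpr (fun e => hx1 ?_)
      rw [← e]
      exact (PySem.Chars.startswith_iff _ _).mpr ⟨rs2, rfl⟩
    have hr2 : (('k' : Char) == r) = false := by
      refine beq_eq_false_iff_ne.mpr (fun e => hx2 ?_)
      rw [← e]
      exact (PySem.Chars.startswith_iff _ _).mpr ⟨rs2, rfl⟩
    refine walkB_stop _ _ _ _ _ ?_
    rw [show (TRIE.getD 12 (none, [])).2 = [('h', 13), ('k', 25)] from by rw [TRIE_eq]; decide]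
    simp [List.find?, hr1, hr2]

theorem walk_d (rs : List Char) : walkB 0 ('d'::rs) 0 none = some (['د'], 1) := by
  rw [walkB_adv_val 0 'd' 'd' 28 ['د'] _ _ _ (by rw [TRIE_eq]; decide) (by rw [TRIE_eq]; decide)]
  exact walkB_nochild 28 (by rw [TRIE_eq]; decide) rs 1 _

theorem walk_e (rs : List Char) (hx1 : ¬ PySem.Chars.startswith ('e'::rs) ['e', 'e'] = true) :
    walkB 0 ('e'::rs) 0 none = some (['ێ'], 1) := by
  rw [walkB_adv_val 0 'e' 'e' 21 ['ێ'] _ _ _ (by rw [TRIE_eq]; decide) (by rw [TRIE_eq]; decide)]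
  cases rs with
  | nil => exact walkB_nil _ _ _
  | cons r rs2 =>
    have hr1 : (('e' : Char) == r) = false := by
      refine beq_eq_false_iff_ne.mpr (fun e => hx1 ?_)
      rw [← e]
      exact (PySem.Chars.startswith_iff _ _).mpr ⟨rs2, rfl⟩
    refine walkB_stop _ _ _ _ _ ?_
    rw [show (TRIE.getD 21 (none, [])).2 = [('e', 22)] from by rw [TRIE_eq]; decide]
    simp [List.find?, hr1]

theorem walk_f (rs : List Char) : walkB 0 ('f'::rs) 0 none = some (['ف'], 1) := by
  rw [walkB_adv_val 0 'f' 'f' 29 ['ف'] _ _ _ (by rw [TRIE_eq]; decide) (by rw [TRIE_eq]; decide)]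
  exact walkB_nochild 29 (by rw [TRIE_eq]; decide) rs 1 _

theorem walk_g (rs : List Char) (hx1 : ¬ PySem.Chars.startswith ('g'::rs) ['g', 'h'] = true) :
    walkB 0 ('g'::rs) 0 none = some (['گ'], 1) := by
  rw [walkB_adv_val 0 'g' 'g' 5 ['گ'] _ _ _ (by rw [TRIE_eq]; decide) (by rw [TRIE_eq]; decide)]
  cases rs with
  | nil => exact walkB_nil _ _ _
  | cons r rs2 =>
    have hr1 : (('h' : Char) == r) = false := by
      refine beq_eq_false_iff_ne.mpr (fun e => hx1 ?_)
      rw [← e]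
      exact (PySem.Chars.startswith_iff _ _).mpr ⟨rs2, rfl⟩
    refine walkB_stop _ _ _ _ _ ?_
    rw [show (TRIE.getD 5 (none, [])).2 = [('h', 6)] from by rw [TRIE_eq]; decide]
    simp [List.find?, hr1]

theorem walk_h (rs : List Char) : walkB 0 ('h'::rs) 0 none = some (['ه'], 1) := by
  rw [walkB_adv_val 0 'h' 'h' 30 ['ه'] _ _ _ (by rw [TRIE_eq]; decide) (by rw [TRIE_eq]; decide)]
  exact walkB_nochild 30 (by rw [TRIE_eq]; decide) rs 1 _

theorem walk_i (rs : List Char) : walkB 0 ('i'::rs) 0 none = some (['ی'], 1) := by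
  rw [walkB_adv_val 0 'i' 'i' 31 ['ی'] _ _ _ (by rw [TRIE_eq]; decide) (by rw [TRIE_eq]; decide)]
  exact walkB_nochild 31 (by rw [TRIE_eq]; decide) rs 1 _

theorem walk_j (rs : List Char) : walkB 0 ('j'::rs) 0 none = some (['ج'], 1) := by
  rw [walkB_adv_val 0 'j' 'j' 32 ['ج'] _ _ _ (by rw [TRIE_eq]; decide) (by rw [TRIE_eq]; decide)]
  exact walkB_nochild 32 (by rw [TRIE_eq]; decide) rs 1 _

theorem walk_k (rs : List Char) (hx1 : ¬ PySem.Chars.startswith ('k'::rs) ['k', 'h'] = true) :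
    walkB 0 ('k'::rs) 0 none = some (['ک'], 1) := by
  rw [walkB_adv_val 0 'k' 'k' 14 ['ک'] _ _ _ (by rw [TRIE_eq]; decide) (by rw [TRIE_eq]; decide)]
  cases rs with
  | nil => exact walkB_nil _ _ _
  | cons r rs2 =>
    have hr1 : (('h' : Char) == r) = false := by
      refine beq_eq_false_iff_ne.mpr (fun e => hx1 ?_)
      rw [← e]
      exact (PySem.Chars.startswith_iff _ _).mpr ⟨rs2, rfl⟩
    refine walkB_stop _ _ _ _ _ ?_
    rw [show (TRIE.getD 14 (none, [])).2 = [('h', 15)] from by rw [TRIE_eq]; decide]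
    simp [List.find?, hr1]

theorem walk_l (rs : List Char) : walkB 0 ('l'::rs) 0 none = some (['ل'], 1) := by
  rw [walkB_adv_val 0 'l' 'l' 33 ['ل'] _ _ _ (by rw [TRIE_eq]; decide) (by rw [TRIE_eq]; decide)]
  exact walkB_nochild 33 (by rw [TRIE_eq]; decide) rs 1 _

theorem walk_m (rs : List Char) : walkB 0 ('m'::rs) 0 none = some (['م'], 1) := by
  rw [walkB_adv_val 0 'm' 'm' 34 ['م'] _ _ _ (by rw [TRIE_eq]; decide) (by rw [TRIE_eq]; decide)]
  exact walkB_nochild 34 (by rw [TRIE_eq]; decide) rs 1 _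

theorem walk_n (rs : List Char) : walkB 0 ('n'::rs) 0 none = some (['ن'], 1) := by
  rw [walkB_adv_val 0 'n' 'n' 35 ['ن'] _ _ _ (by rw [TRIE_eq]; decide) (by rw [TRIE_eq]; decide)]
  exact walkB_nochild 35 (by rw [TRIE_eq]; decide) rs 1 _

theorem walk_o (rs : List Char) (hx1 : ¬ PySem.Chars.startswith ('o'::rs) ['o', 'o'] = true) :
    walkB 0 ('o'::rs) 0 none = some (['ۆ'], 1) := by
  rw [walkB_adv_val 0 'o' 'o' 19 ['ۆ'] _ _ _ (by rw [TRIE_eq]; decide) (by rw [TRIE_eq]; decide)]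
  cases rs with
  | nil => exact walkB_nil _ _ _
  | cons r rs2 =>
    have hr1 : (('o' : Char) == r) = false := by
      refine beq_eq_false_iff_ne.mpr (fun e => hx1 ?_)
      rw [← e]
      exact (PySem.Chars.startswith_iff _ _).mpr ⟨rs2, rfl⟩
    refine walkB_stop _ _ _ _ _ ?_
    rw [show (TRIE.getD 19 (none, [])).2 = [('o', 20)] from by rw [TRIE_eq]; decide]
    simp [List.find?, hr1]

theorem walk_p (rs : List Char) (hx1 : ¬ PySem.Chars.startswith ('p'::rs) ['p', 'h'] = true) :
    walkB 0 ('p'::rs) 0 none = some (['پ'], 1) := by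
  rw [walkB_adv_val 0 'p' 'p' 8 ['پ'] _ _ _ (by rw [TRIE_eq]; decide) (by rw [TRIE_eq]; decide)]
  cases rs with
  | nil => exact walkB_nil _ _ _
  | cons r rs2 =>
    have hr1 : (('h' : Char) == r) = false := by
      refine beq_eq_false_iff_ne.mpr (fun e => hx1 ?_)
      rw [← e]
      exact (PySem.Chars.startswith_iff _ _).mpr ⟨rs2, rfl⟩
    refine walkB_stop _ _ _ _ _ ?_
    rw [show (TRIE.getD 8 (none, [])).2 = [('h', 9)] from by rw [TRIE_eq]; decide]
    simp [List.find?, hr1]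

theorem walk_q (rs : List Char) (hx1 : ¬ PySem.Chars.startswith ('q'::rs) ['q', 'u'] = true) :
    walkB 0 ('q'::rs) 0 none = some (['ک'], 1) := by
  rw [walkB_adv_val 0 'q' 'q' 23 ['ک'] _ _ _ (by rw [TRIE_eq]; decide) (by rw [TRIE_eq]; decide)]
  cases rs with
  | nil => exact walkB_nil _ _ _
  | cons r rs2 =>
    have hr1 : (('u' : Char) == r) = false := by
      refine beq_eq_false_iff_ne.mpr (fun e => hx1 ?_)
      rw [← e]
      exact (PySem.Chars.startswith_iff _ _).mpr ⟨rs2, rfl⟩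
    refine walkB_stop _ _ _ _ _ ?_
    rw [show (TRIE.getD 23 (none, [])).2 = [('u', 24)] from by rw [TRIE_eq]; decide]
    simp [List.find?, hr1]

theorem walk_r (rs : List Char) : walkB 0 ('r'::rs) 0 none = some (['ڕ'], 1) := by
  rw [walkB_adv_val 0 'r' 'r' 36 ['ڕ'] _ _ _ (by rw [TRIE_eq]; decide) (by rw [TRIE_eq]; decide)]
  exact walkB_nochild 36 (by rw [TRIE_eq]; decide) rs 1 _

theorem walk_s (rs : List Char) (hx1 : ¬ PySem.Chars.startswith ('s'::rs) ['s', 'h'] = true) :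
    walkB 0 ('s'::rs) 0 none = some (['س'], 1) := by
  rw [walkB_adv_val 0 's' 's' 10 ['س'] _ _ _ (by rw [TRIE_eq]; decide) (by rw [TRIE_eq]; decide)]
  cases rs with
  | nil => exact walkB_nil _ _ _
  | cons r rs2 =>
    have hr1 : (('h' : Char) == r) = false := by
      refine beq_eq_false_iff_ne.mpr (fun e => hx1 ?_)
      rw [← e]
      exact (PySem.Chars.startswith_iff _ _).mpr ⟨rs2, rfl⟩
    refine walkB_stop _ _ _ _ _ ?_
    rw [show (TRIE.getD 10 (none, [])).2 = [('h', 11)] from by rw [TRIE_eq]; decide]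
    simp [List.find?, hr1]

theorem walk_t (rs : List Char) (hx1 : ¬ PySem.Chars.startswith ('t'::rs) ['t', 'i', 'o', 'n'] = true)
    (hx2 : ¬ PySem.Chars.startswith ('t'::rs) ['t', 'h'] = true) :
    walkB 0 ('t'::rs) 0 none = some (['ت'], 1) := by
  rw [walkB_adv_val 0 't' 't' 1 ['ت'] _ _ _ (by rw [TRIE_eq]; decide) (by rw [TRIE_eq]; decide)]
  cases rs with
  | nil => exact walkB_nil _ _ _
  | cons r rs2 =>
    have hrh : (('h' : Char) == r) = false := by
      refine beq_eq_false_iff_ne.mpr (fun e => hx2 ?_)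
      rw [← e]
      exact (PySem.Chars.startswith_iff _ _).mpr ⟨rs2, rfl⟩
    by_cases hri : r = 'i'
    · subst hri
      rw [walkB_adv_noval 1 'i' 'i' 2 _ _ _ (by rw [TRIE_eq]; decide) (by rw [TRIE_eq]; decide)]
      cases rs2 with
      | nil => exact walkB_nil _ _ _
      | cons r2 rs3 =>
        by_cases hro : r2 = 'o'
        · subst hro
          rw [walkB_adv_noval 2 'o' 'o' 3 _ _ _ (by rw [TRIE_eq]; decide) (by rw [TRIE_eq]; decide)]
          cases rs3 with
          | nil => exact walkB_nil _ _ _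
          | cons r3 rs4 =>
            have hrn : (('n' : Char) == r3) = false := by
              refine beq_eq_false_iff_ne.mpr (fun e => hx1 ?_)
              rw [← e]
              exact (PySem.Chars.startswith_iff _ _).mpr ⟨rs4, rfl⟩
            refine walkB_stop _ _ _ _ _ ?_
            rw [show (TRIE.getD 3 (none, [])).2 = [('n', 4)] from by rw [TRIE_eq]; decide]
            simp [List.find?, hrn]
        · have hro' : (('o' : Char) == r2) = false := beq_eq_false_iff_ne.mpr (fun e => hro e.symm)
          refine walkB_stop _ _ _ _ _ ?_
          rw [show (TRIE.getD 2 (none, [])).2 = [('o', 3)] from by rw [TRIE_eq]; decide]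
          simp [List.find?, hro']
    · have hri' : (('i' : Char) == r) = false := beq_eq_false_iff_ne.mpr (fun e => hri e.symm)
      refine walkB_stop _ _ _ _ _ ?_
      rw [show (TRIE.getD 1 (none, [])).2 = [('i', 2), ('h', 16)] from by rw [TRIE_eq]; decide]
      simp [List.find?, hri', hrh]

theorem walk_u (rs : List Char) : walkB 0 ('u'::rs) 0 none = some (['و'], 1) := by
  rw [walkB_adv_val 0 'u' 'u' 37 ['و'] _ _ _ (by rw [TRIE_eq]; decide) (by rw [TRIE_eq]; decide)]
  exact walkB_nochild 37 (by rw [TRIE_eq]; decide) rs 1 _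

theorem walk_v (rs : List Char) : walkB 0 ('v'::rs) 0 none = some (['ڤ'], 1) := by
  rw [walkB_adv_val 0 'v' 'v' 38 ['ڤ'] _ _ _ (by rw [TRIE_eq]; decide) (by rw [TRIE_eq]; decide)]
  exact walkB_nochild 38 (by rw [TRIE_eq]; decide) rs 1 _

theorem walk_w (rs : List Char) : walkB 0 ('w'::rs) 0 none = some (['و'], 1) := by
  rw [walkB_adv_val 0 'w' 'w' 39 ['و'] _ _ _ (by rw [TRIE_eq]; decide) (by rw [TRIE_eq]; decide)]
  exact walkB_nochild 39 (by rw [TRIE_eq]; decide) rs 1 _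

theorem walk_x (rs : List Char) : walkB 0 ('x'::rs) 0 none = some (['ک', 'س'], 1) := by
  rw [walkB_adv_val 0 'x' 'x' 40 ['ک', 'س'] _ _ _ (by rw [TRIE_eq]; decide) (by rw [TRIE_eq]; decide)]
  exact walkB_nochild 40 (by rw [TRIE_eq]; decide) rs 1 _

theorem walk_y (rs : List Char) : walkB 0 ('y'::rs) 0 none = some (['ی'], 1) := by
  rw [walkB_adv_val 0 'y' 'y' 41 ['ی'] _ _ _ (by rw [TRIE_eq]; decide) (by rw [TRIE_eq]; decide)]
  exact walkB_nochild 41 (by rw [TRIE_eq]; decide) rs 1 _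

theorem walk_z (rs : List Char) (hx1 : ¬ PySem.Chars.startswith ('z'::rs) ['z', 'h'] = true) :
    walkB 0 ('z'::rs) 0 none = some (['ز'], 1) := by
  rw [walkB_adv_val 0 'z' 'z' 17 ['ز'] _ _ _ (by rw [TRIE_eq]; decide) (by rw [TRIE_eq]; decide)]
  cases rs with
  | nil => exact walkB_nil _ _ _
  | cons r rs2 =>
    have hr1 : (('h' : Char) == r) = false := by
      refine beq_eq_false_iff_ne.mpr (fun e => hx1 ?_)
      rw [← e]
      exact (PySem.Chars.startswith_iff _ _).mpr ⟨rs2, rfl⟩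
    refine walkB_stop _ _ _ _ _ ?_
    rw [show (TRIE.getD 17 (none, [])).2 = [('h', 18)] from by rw [TRIE_eq]; decide]
    simp [List.find?, hr1]

theorem walk_default (c : Char) (cs : List Char)
    (hs0 : ('a' : Char) ≠ c) (hs1 : ('b' : Char) ≠ c) (hs2 : ('c' : Char) ≠ c) (hs3 : ('d' : Char) ≠ c) (hs4 : ('e' : Char) ≠ c) (hs5 : ('f' : Char) ≠ c) (hs6 : ('g' : Char) ≠ c) (hs7 : ('h' : Char) ≠ c) (hs8 : ('i' : Char) ≠ c) (hs9 : ('j' : Char) ≠ c) (hs10 : ('k' : Char) ≠ c) (hs11 : ('l' : Char) ≠ c) (hs12 : ('m' : Char) ≠ c) (hs13 : ('n' : Char) ≠ c) (hs14 : ('o' : Char) ≠ c) (hs15 : ('p' : Char) ≠ c) (hs16 : ('q' : Char) ≠ c) (hs17 : ('r' : Char) ≠ c) (hs18 : ('s' : Char) ≠ c) (hs19 : ('t' : Char) ≠ c) (hs20 : ('u' : Char) ≠ c) (hs21 : ('v' : Char) ≠ c) (hs22 : ('w' : Char) ≠ c) (hs23 : ('x' : Char) ≠ c) (hs24 : ('y'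 : Char) ≠ c) (hs25 : ('z' : Char) ≠ c) :
    walkB 0 (c :: cs) 0 none = none := by
  refine walkB_stop _ _ _ _ _ ?_
  rw [show (TRIE.getD 0 (none, [])).2 = [('t', 1), ('g', 5), ('p', 8), ('s', 10), ('c', 12), ('k', 14), ('z', 17), ('o', 19), ('e', 21), ('q', 23), ('a', 26), ('b', 27), ('d', 28), ('f', 29), ('h', 30), ('i', 31), ('j', 32), ('l', 33), ('m', 34), ('n', 35), ('r', 36), ('u', 37), ('v', 38), ('w', 39), ('x', 40), ('y', 41)] from by rw [TRIE_eq]; decide]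
  simp [List.find?, beq_eq_false_iff_ne.mpr hs0, beq_eq_false_iff_ne.mpr hs1, beq_eq_false_iff_ne.mpr hs2, beq_eq_false_iff_ne.mpr hs3, beq_eq_false_iff_ne.mpr hs4, beq_eq_false_iff_ne.mpr hs5, beq_eq_false_iff_ne.mpr hs6, beq_eq_false_iff_ne.mpr hs7, beq_eq_false_iff_ne.mpr hs8, beq_eq_false_iff_ne.mpr hs9, beq_eq_false_iff_ne.mpr hs10, beq_eq_false_iff_ne.mpr hs11, beq_eq_false_iff_ne.mpr hs12, beq_eq_false_iff_ne.mpr hs13, beq_eq_false_iff_ne.mpr hs14, beq_eq_false_iff_ne.mpr hs15, beq_eq_false_iff_ne.mpr hs16, beq_eq_false_iff_ne.mpr hs17, beq_eq_false_iff_ne.mpr hs18, beq_eq_false_iff_ne.mpr hs19, beq_eq_false_iff_ne.mpr hs20, beq_eq_false_iff_ne.mpr hs21, beq_eq_false_iff_ne.mpr hs22, beq_eq_false_iff_ne.mpr hs23, beq_eq_false_iff_ne.mpr hs24, beq_eq_false_iff_ne.mpr hs25]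

set_option maxHeartbeats 2000000 in
theorem loop_eq_aux : ∀ (n : Nat) (l : List Char), l.length ≤ n → aLoop l = bLoop l := by
  intro n
  induction n with
  | zero =>
    intro l hl
    rcases l with _ | ⟨c, cs⟩
    · rw [aLoop_nil, bLoop_nil]
    · simp at hl
  | succ n ih =>
    intro l hl
    by_cases h1 : PySem.Chars.startswith l ['t', 'i', 'o', 'n'] = true
    · obtain ⟨rs, hrs⟩ := (PySem.Chars.startswith_iff _ _).mp h1
      subst hrs
      simp only [List.cons_append, List.nil_append] at *
      rw [aLoop]
      rw [if_pos (show 4 ≤ ('t'::'i'::'o'::'n'::rs).length by simp)]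
      rw [show (('t'::'i'::'o'::'n'::rs).take 4) = ['t', 'i', 'o', 'n'] from rfl]
      rw [show MULTI.get? ['t', 'i', 'o', 'n'] = some ['ش', 'ن'] from by decide]
      rw [bLoop_cons, walk_tion rs]
      show ['ش', 'ن'] ++ aLoop (('t'::'i'::'o'::'n'::rs).drop 4) = ['ش', 'ن'] ++ bLoop (('t'::'i'::'o'::'n'::rs).drop 4)
      rw [show (('t'::'i'::'o'::'n'::rs).drop 4) = rs from rfl]
      rw [ih rs (by simp only [List.length_cons] at hl; omega)]
    by_cases h2 : PySem.Chars.startswith l ['g', 'h', 't'] = true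
    · obtain ⟨rs, hrs⟩ := (PySem.Chars.startswith_iff _ _).mp h2
      subst hrs
      simp only [List.cons_append, List.nil_append] at *
      rw [aLoop, scrut4_none _ h1]
      rw [if_pos (show 3 ≤ ('g'::'h'::'t'::rs).length by simp)]
      rw [show (('g'::'h'::'t'::rs).take 3) = ['g', 'h', 't'] from rfl]
      rw [show MULTI.get? ['g', 'h', 't'] = some ['ت'] from by decide]
      rw [bLoop_cons, walk_ght rs]
      show ['ت'] ++ aLoop (('g'::'h'::'t'::rs).drop 3) = ['ت'] ++ bLoop (('g'::'h'::'t'::rs).drop 3)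
      rw [show (('g'::'h'::'t'::rs).drop 3) = rs from rfl]
      rw [ih rs (by simp only [List.length_cons] at hl; omega)]
    by_cases h3 : PySem.Chars.startswith l ['p', 'h'] = true
    · obtain ⟨rs, hrs⟩ := (PySem.Chars.startswith_iff _ _).mp h3
      subst hrs
      simp only [List.cons_append, List.nil_append] at *
      rw [aLoop, scrut4_none _ h1, scrut3_none _ h2]
      rw [if_pos (show 2 ≤ ('p'::'h'::rs).length by simp)]
      rw [show (('p'::'h'::rs).take 2) = ['p', 'h'] from rfl]
      rw [show MULTI.get? ['p', 'h'] = some ['ف'] from by decide]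
      rw [bLoop_cons, walk_ph rs]
      show ['ف'] ++ aLoop (('p'::'h'::rs).drop 2) = ['ف'] ++ bLoop (('p'::'h'::rs).drop 2)
      rw [show (('p'::'h'::rs).drop 2) = rs from rfl]
      rw [ih rs (by simp only [List.length_cons] at hl; omega)]
    by_cases h4 : PySem.Chars.startswith l ['s', 'h'] = true
    · obtain ⟨rs, hrs⟩ := (PySem.Chars.startswith_iff _ _).mp h4
      subst hrs
      simp only [List.cons_append, List.nil_append] at *
      rw [aLoop, scrut4_none _ h1, scrut3_none _ h2]
      rw [if_pos (show 2 ≤ ('s'::'h'::rs).length by simp)]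
      rw [show (('s'::'h'::rs).take 2) = ['s', 'h'] from rfl]
      rw [show MULTI.get? ['s', 'h'] = some ['ش'] from by decide]
      rw [bLoop_cons, walk_sh rs]
      show ['ش'] ++ aLoop (('s'::'h'::rs).drop 2) = ['ش'] ++ bLoop (('s'::'h'::rs).drop 2)
      rw [show (('s'::'h'::rs).drop 2) = rs from rfl]
      rw [ih rs (by simp only [List.length_cons] at hl; omega)]
    by_cases h5 : PySem.Chars.startswith l ['c', 'h'] = true
    · obtain ⟨rs, hrs⟩ := (PySem.Chars.startswith_iff _ _).mp h5
      subst hrs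
      simp only [List.cons_append, List.nil_append] at *
      rw [aLoop, scrut4_none _ h1, scrut3_none _ h2]
      rw [if_pos (show 2 ≤ ('c'::'h'::rs).length by simp)]
      rw [show (('c'::'h'::rs).take 2) = ['c', 'h'] from rfl]
      rw [show MULTI.get? ['c', 'h'] = some ['چ'] from by decide]
      rw [bLoop_cons, walk_ch rs]
      show ['چ'] ++ aLoop (('c'::'h'::rs).drop 2) = ['چ'] ++ bLoop (('c'::'h'::rs).drop 2)
      rw [show (('c'::'h'::rs).drop 2) = rs from rfl]
      rw [ih rs (by simp only [List.length_cons] at hl; omega)]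
    by_cases h6 : PySem.Chars.startswith l ['k', 'h'] = true
    · obtain ⟨rs, hrs⟩ := (PySem.Chars.startswith_iff _ _).mp h6
      subst hrs
      simp only [List.cons_append, List.nil_append] at *
      rw [aLoop, scrut4_none _ h1, scrut3_none _ h2]
      rw [if_pos (show 2 ≤ ('k'::'h'::rs).length by simp)]
      rw [show (('k'::'h'::rs).take 2) = ['k', 'h'] from rfl]
      rw [show MULTI.get? ['k', 'h'] = some ['خ'] from by decide]
      rw [bLoop_cons, walk_kh rs]
      show ['خ'] ++ aLoop (('k'::'h'::rs).drop 2) = ['خ'] ++ bLoop (('k'::'h'::rs).drop 2)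
      rw [show (('k'::'h'::rs).drop 2) = rs from rfl]
      rw [ih rs (by simp only [List.length_cons] at hl; omega)]
    by_cases h7 : PySem.Chars.startswith l ['g', 'h'] = true
    · obtain ⟨rs, hrs⟩ := (PySem.Chars.startswith_iff _ _).mp h7
      subst hrs
      simp only [List.cons_append, List.nil_append] at *
      rw [aLoop, scrut4_none _ h1, scrut3_none _ h2]
      rw [if_pos (show 2 ≤ ('g'::'h'::rs).length by simp)]
      rw [show (('g'::'h'::rs).take 2) = ['g', 'h'] from rfl]
      rw [show MULTI.get? ['g', 'h'] = some ['غ'] from by decide]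
      rw [bLoop_cons, walk_gh rs h2]
      show ['غ'] ++ aLoop (('g'::'h'::rs).drop 2) = ['غ'] ++ bLoop (('g'::'h'::rs).drop 2)
      rw [show (('g'::'h'::rs).drop 2) = rs from rfl]
      rw [ih rs (by simp only [List.length_cons] at hl; omega)]
    by_cases h8 : PySem.Chars.startswith l ['t', 'h'] = true
    · obtain ⟨rs, hrs⟩ := (PySem.Chars.startswith_iff _ _).mp h8
      subst hrs
      simp only [List.cons_append, List.nil_append] at *
      rw [aLoop, scrut4_none _ h1, scrut3_none _ h2]
      rw [if_pos (show 2 ≤ ('t'::'h'::rs).length by simp)]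
      rw [show (('t'::'h'::rs).take 2) = ['t', 'h'] from rfl]
      rw [show MULTI.get? ['t', 'h'] = some ['س'] from by decide]
      rw [bLoop_cons, walk_th rs]
      show ['س'] ++ aLoop (('t'::'h'::rs).drop 2) = ['س'] ++ bLoop (('t'::'h'::rs).drop 2)
      rw [show (('t'::'h'::rs).drop 2) = rs from rfl]
      rw [ih rs (by simp only [List.length_cons] at hl; omega)]
    by_cases h9 : PySem.Chars.startswith l ['z', 'h'] = true
    · obtain ⟨rs, hrs⟩ := (PySem.Chars.startswith_iff _ _).mp h9
      subst hrs
      simp only [List.cons_append, List.nil_append] at *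
      rw [aLoop, scrut4_none _ h1, scrut3_none _ h2]
      rw [if_pos (show 2 ≤ ('z'::'h'::rs).length by simp)]
      rw [show (('z'::'h'::rs).take 2) = ['z', 'h'] from rfl]
      rw [show MULTI.get? ['z', 'h'] = some ['ژ'] from by decide]
      rw [bLoop_cons, walk_zh rs]
      show ['ژ'] ++ aLoop (('z'::'h'::rs).drop 2) = ['ژ'] ++ bLoop (('z'::'h'::rs).drop 2)
      rw [show (('z'::'h'::rs).drop 2) = rs from rfl]
      rw [ih rs (by simp only [List.length_cons] at hl; omega)]
    by_cases h10 : PySem.Chars.startswith l ['o', 'o'] = true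
    · obtain ⟨rs, hrs⟩ := (PySem.Chars.startswith_iff _ _).mp h10
      subst hrs
      simp only [List.cons_append, List.nil_append] at *
      rw [aLoop, scrut4_none _ h1, scrut3_none _ h2]
      rw [if_pos (show 2 ≤ ('o'::'o'::rs).length by simp)]
      rw [show (('o'::'o'::rs).take 2) = ['o', 'o'] from rfl]
      rw [show MULTI.get? ['o', 'o'] = some ['و', 'و'] from by decide]
      rw [bLoop_cons, walk_oo rs]
      show ['و', 'و'] ++ aLoop (('o'::'o'::rs).drop 2) = ['و', 'و'] ++ bLoop (('o'::'o'::rs).drop 2)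
      rw [show (('o'::'o'::rs).drop 2) = rs from rfl]
      rw [ih rs (by simp only [List.length_cons] at hl; omega)]
    by_cases h11 : PySem.Chars.startswith l ['e', 'e'] = true
    · obtain ⟨rs, hrs⟩ := (PySem.Chars.startswith_iff _ _).mp h11
      subst hrs
      simp only [List.cons_append, List.nil_append] at *
      rw [aLoop, scrut4_none _ h1, scrut3_none _ h2]
      rw [if_pos (show 2 ≤ ('e'::'e'::rs).length by simp)]
      rw [show (('e'::'e'::rs).take 2) = ['e', 'e'] from rfl]
      rw [show MULTI.get? ['e', 'e'] = some ['ی'] from by decide]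
      rw [bLoop_cons, walk_ee rs]
      show ['ی'] ++ aLoop (('e'::'e'::rs).drop 2) = ['ی'] ++ bLoop (('e'::'e'::rs).drop 2)
      rw [show (('e'::'e'::rs).drop 2) = rs from rfl]
      rw [ih rs (by simp only [List.length_cons] at hl; omega)]
    by_cases h12 : PySem.Chars.startswith l ['q', 'u'] = true
    · obtain ⟨rs, hrs⟩ := (PySem.Chars.startswith_iff _ _).mp h12
      subst hrs
      simp only [List.cons_append, List.nil_append] at *
      rw [aLoop, scrut4_none _ h1, scrut3_none _ h2]
      rw [if_pos (show 2 ≤ ('q'::'u'::rs).length by simp)]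
      rw [show (('q'::'u'::rs).take 2) = ['q', 'u'] from rfl]
      rw [show MULTI.get? ['q', 'u'] = some ['ک', 'و'] from by decide]
      rw [bLoop_cons, walk_qu rs]
      show ['ک', 'و'] ++ aLoop (('q'::'u'::rs).drop 2) = ['ک', 'و'] ++ bLoop (('q'::'u'::rs).drop 2)
      rw [show (('q'::'u'::rs).drop 2) = rs from rfl]
      rw [ih rs (by simp only [List.length_cons] at hl; omega)]
    by_cases h13 : PySem.Chars.startswith l ['c', 'k'] = true
    · obtain ⟨rs, hrs⟩ := (PySem.Chars.startswith_iff _ _).mp h13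
      subst hrs
      simp only [List.cons_append, List.nil_append] at *
      rw [aLoop, scrut4_none _ h1, scrut3_none _ h2]
      rw [if_pos (show 2 ≤ ('c'::'k'::rs).length by simp)]
      rw [show (('c'::'k'::rs).take 2) = ['c', 'k'] from rfl]
      rw [show MULTI.get? ['c', 'k'] = some ['ک'] from by decide]
      rw [bLoop_cons, walk_ck rs]
      show ['ک'] ++ aLoop (('c'::'k'::rs).drop 2) = ['ک'] ++ bLoop (('c'::'k'::rs).drop 2)
      rw [show (('c'::'k'::rs).drop 2) = rs from rfl]
      rw [ih rs (by simp only [List.length_cons] at hl; omega)]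
    by_cases h14 : PySem.Chars.startswith l ['a'] = true
    · obtain ⟨rs, hrs⟩ := (PySem.Chars.startswith_iff _ _).mp h14
      subst hrs
      simp only [List.cons_append, List.nil_append] at *
      rw [aLoop, scrut4_none _ h1, scrut3_none _ h2,
          scrut2_none _ h3 h4 h5 h6 h7 h8 h9 h10 h11 h12 h13]
      rw [show SINGLE.get? ['a'] = some ['ا'] from by decide]
      rw [bLoop_cons, walk_a rs]
      show ['ا'] ++ aLoop rs = ['ا'] ++ bLoop (('a'::rs).drop 1)
      rw [show (('a'::rs).drop 1) = rs from rfl]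
      rw [ih rs (by simp only [List.length_cons] at hl; omega)]
    by_cases h15 : PySem.Chars.startswith l ['b'] = true
    · obtain ⟨rs, hrs⟩ := (PySem.Chars.startswith_iff _ _).mp h15
      subst hrs
      simp only [List.cons_append, List.nil_append] at *
      rw [aLoop, scrut4_none _ h1, scrut3_none _ h2,
          scrut2_none _ h3 h4 h5 h6 h7 h8 h9 h10 h11 h12 h13]
      rw [show SINGLE.get? ['b'] = some ['ب'] from by decide]
      rw [bLoop_cons, walk_b rs]
      show ['ب'] ++ aLoop rs = ['ب'] ++ bLoop (('b'::rs).drop 1)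
      rw [show (('b'::rs).drop 1) = rs from rfl]
      rw [ih rs (by simp only [List.length_cons] at hl; omega)]
    by_cases h16 : PySem.Chars.startswith l ['c'] = true
    · obtain ⟨rs, hrs⟩ := (PySem.Chars.startswith_iff _ _).mp h16
      subst hrs
      simp only [List.cons_append, List.nil_append] at *
      rw [aLoop, scrut4_none _ h1, scrut3_none _ h2,
          scrut2_none _ h3 h4 h5 h6 h7 h8 h9 h10 h11 h12 h13]
      rw [show SINGLE.get? ['c'] = some ['ک'] from by decide]
      rw [bLoop_cons, walk_c rs h5 h13]
      show ['ک'] ++ aLoop rs = ['ک'] ++ bLoop (('c'::rs).drop 1)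
      rw [show (('c'::rs).drop 1) = rs from rfl]
      rw [ih rs (by simp only [List.length_cons] at hl; omega)]
    by_cases h17 : PySem.Chars.startswith l ['d'] = true
    · obtain ⟨rs, hrs⟩ := (PySem.Chars.startswith_iff _ _).mp h17
      subst hrs
      simp only [List.cons_append, List.nil_append] at *
      rw [aLoop, scrut4_none _ h1, scrut3_none _ h2,
          scrut2_none _ h3 h4 h5 h6 h7 h8 h9 h10 h11 h12 h13]
      rw [show SINGLE.get? ['d'] = some ['د'] from by decide]
      rw [bLoop_cons, walk_d rs]
      show ['د'] ++ aLoop rs = ['د'] ++ bLoop (('d'::rs).drop 1)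
      rw [show (('d'::rs).drop 1) = rs from rfl]
      rw [ih rs (by simp only [List.length_cons] at hl; omega)]
    by_cases h18 : PySem.Chars.startswith l ['e'] = true
    · obtain ⟨rs, hrs⟩ := (PySem.Chars.startswith_iff _ _).mp h18
      subst hrs
      simp only [List.cons_append, List.nil_append] at *
      rw [aLoop, scrut4_none _ h1, scrut3_none _ h2,
          scrut2_none _ h3 h4 h5 h6 h7 h8 h9 h10 h11 h12 h13]
      rw [show SINGLE.get? ['e'] = some ['ێ'] from by decide]
      rw [bLoop_cons, walk_e rs h11]
      show ['ێ'] ++ aLoop rs = ['ێ'] ++ bLoop (('e'::rs).drop 1)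
      rw [show (('e'::rs).drop 1) = rs from rfl]
      rw [ih rs (by simp only [List.length_cons] at hl; omega)]
    by_cases h19 : PySem.Chars.startswith l ['f'] = true
    · obtain ⟨rs, hrs⟩ := (PySem.Chars.startswith_iff _ _).mp h19
      subst hrs
      simp only [List.cons_append, List.nil_append] at *
      rw [aLoop, scrut4_none _ h1, scrut3_none _ h2,
          scrut2_none _ h3 h4 h5 h6 h7 h8 h9 h10 h11 h12 h13]
      rw [show SINGLE.get? ['f'] = some ['ف'] from by decide]
      rw [bLoop_cons, walk_f rs]
      show ['ف'] ++ aLoop rs = ['ف'] ++ bLoop (('f'::rs).drop 1)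
      rw [show (('f'::rs).drop 1) = rs from rfl]
      rw [ih rs (by simp only [List.length_cons] at hl; omega)]
    by_cases h20 : PySem.Chars.startswith l ['g'] = true
    · obtain ⟨rs, hrs⟩ := (PySem.Chars.startswith_iff _ _).mp h20
      subst hrs
      simp only [List.cons_append, List.nil_append] at *
      rw [aLoop, scrut4_none _ h1, scrut3_none _ h2,
          scrut2_none _ h3 h4 h5 h6 h7 h8 h9 h10 h11 h12 h13]
      rw [show SINGLE.get? ['g'] = some ['گ'] from by decide]
      rw [bLoop_cons, walk_g rs h7]
      show ['گ'] ++ aLoop rs = ['گ'] ++ bLoop (('g'::rs).drop 1)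
      rw [show (('g'::rs).drop 1) = rs from rfl]
      rw [ih rs (by simp only [List.length_cons] at hl; omega)]
    by_cases h21 : PySem.Chars.startswith l ['h'] = true
    · obtain ⟨rs, hrs⟩ := (PySem.Chars.startswith_iff _ _).mp h21
      subst hrs
      simp only [List.cons_append, List.nil_append] at *
      rw [aLoop, scrut4_none _ h1, scrut3_none _ h2,
          scrut2_none _ h3 h4 h5 h6 h7 h8 h9 h10 h11 h12 h13]
      rw [show SINGLE.get? ['h'] = some ['ه'] from by decide]
      rw [bLoop_cons, walk_h rs]
      show ['ه'] ++ aLoop rs = ['ه'] ++ bLoop (('h'::rs).drop 1)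
      rw [show (('h'::rs).drop 1) = rs from rfl]
      rw [ih rs (by simp only [List.length_cons] at hl; omega)]
    by_cases h22 : PySem.Chars.startswith l ['i'] = true
    · obtain ⟨rs, hrs⟩ := (PySem.Chars.startswith_iff _ _).mp h22
      subst hrs
      simp only [List.cons_append, List.nil_append] at *
      rw [aLoop, scrut4_none _ h1, scrut3_none _ h2,
          scrut2_none _ h3 h4 h5 h6 h7 h8 h9 h10 h11 h12 h13]
      rw [show SINGLE.get? ['i'] = some ['ی'] from by decide]
      rw [bLoop_cons, walk_i rs]
      show ['ی'] ++ aLoop rs = ['ی'] ++ bLoop (('i'::rs).drop 1)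
      rw [show (('i'::rs).drop 1) = rs from rfl]
      rw [ih rs (by simp only [List.length_cons] at hl; omega)]
    by_cases h23 : PySem.Chars.startswith l ['j'] = true
    · obtain ⟨rs, hrs⟩ := (PySem.Chars.startswith_iff _ _).mp h23
      subst hrs
      simp only [List.cons_append, List.nil_append] at *
      rw [aLoop, scrut4_none _ h1, scrut3_none _ h2,
          scrut2_none _ h3 h4 h5 h6 h7 h8 h9 h10 h11 h12 h13]
      rw [show SINGLE.get? ['j'] = some ['ج'] from by decide]
      rw [bLoop_cons, walk_j rs]
      show ['ج'] ++ aLoop rs = ['ج'] ++ bLoop (('j'::rs).drop 1)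
      rw [show (('j'::rs).drop 1) = rs from rfl]
      rw [ih rs (by simp only [List.length_cons] at hl; omega)]
    by_cases h24 : PySem.Chars.startswith l ['k'] = true
    · obtain ⟨rs, hrs⟩ := (PySem.Chars.startswith_iff _ _).mp h24
      subst hrs
      simp only [List.cons_append, List.nil_append] at *
      rw [aLoop, scrut4_none _ h1, scrut3_none _ h2,
          scrut2_none _ h3 h4 h5 h6 h7 h8 h9 h10 h11 h12 h13]
      rw [show SINGLE.get? ['k'] = some ['ک'] from by decide]
      rw [bLoop_cons, walk_k rs h6]
      show ['ک'] ++ aLoop rs = ['ک'] ++ bLoop (('k'::rs).drop 1)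
      rw [show (('k'::rs).drop 1) = rs from rfl]
      rw [ih rs (by simp only [List.length_cons] at hl; omega)]
    by_cases h25 : PySem.Chars.startswith l ['l'] = true
    · obtain ⟨rs, hrs⟩ := (PySem.Chars.startswith_iff _ _).mp h25
      subst hrs
      simp only [List.cons_append, List.nil_append] at *
      rw [aLoop, scrut4_none _ h1, scrut3_none _ h2,
          scrut2_none _ h3 h4 h5 h6 h7 h8 h9 h10 h11 h12 h13]
      rw [show SINGLE.get? ['l'] = some ['ل'] from by decide]
      rw [bLoop_cons, walk_l rs]
      show ['ل'] ++ aLoop rs = ['ل'] ++ bLoop (('l'::rs).drop 1)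
      rw [show (('l'::rs).drop 1) = rs from rfl]
      rw [ih rs (by simp only [List.length_cons] at hl; omega)]
    by_cases h26 : PySem.Chars.startswith l ['m'] = true
    · obtain ⟨rs, hrs⟩ := (PySem.Chars.startswith_iff _ _).mp h26
      subst hrs
      simp only [List.cons_append, List.nil_append] at *
      rw [aLoop, scrut4_none _ h1, scrut3_none _ h2,
          scrut2_none _ h3 h4 h5 h6 h7 h8 h9 h10 h11 h12 h13]
      rw [show SINGLE.get? ['m'] = some ['م'] from by decide]
      rw [bLoop_cons, walk_m rs]
      show ['م'] ++ aLoop rs = ['م'] ++ bLoop (('m'::rs).drop 1)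
      rw [show (('m'::rs).drop 1) = rs from rfl]
      rw [ih rs (by simp only [List.length_cons] at hl; omega)]
    by_cases h27 : PySem.Chars.startswith l ['n'] = true
    · obtain ⟨rs, hrs⟩ := (PySem.Chars.startswith_iff _ _).mp h27
      subst hrs
      simp only [List.cons_append, List.nil_append] at *
      rw [aLoop, scrut4_none _ h1, scrut3_none _ h2,
          scrut2_none _ h3 h4 h5 h6 h7 h8 h9 h10 h11 h12 h13]
      rw [show SINGLE.get? ['n'] = some ['ن'] from by decide]
      rw [bLoop_cons, walk_n rs]
      show ['ن'] ++ aLoop rs = ['ن'] ++ bLoop (('n'::rs).drop 1)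
      rw [show (('n'::rs).drop 1) = rs from rfl]
      rw [ih rs (by simp only [List.length_cons] at hl; omega)]
    by_cases h28 : PySem.Chars.startswith l ['o'] = true
    · obtain ⟨rs, hrs⟩ := (PySem.Chars.startswith_iff _ _).mp h28
      subst hrs
      simp only [List.cons_append, List.nil_append] at *
      rw [aLoop, scrut4_none _ h1, scrut3_none _ h2,
          scrut2_none _ h3 h4 h5 h6 h7 h8 h9 h10 h11 h12 h13]
      rw [show SINGLE.get? ['o'] = some ['ۆ'] from by decide]
      rw [bLoop_cons, walk_o rs h10]
      show ['ۆ'] ++ aLoop rs = ['ۆ'] ++ bLoop (('o'::rs).drop 1)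
      rw [show (('o'::rs).drop 1) = rs from rfl]
      rw [ih rs (by simp only [List.length_cons] at hl; omega)]
    by_cases h29 : PySem.Chars.startswith l ['p'] = true
    · obtain ⟨rs, hrs⟩ := (PySem.Chars.startswith_iff _ _).mp h29
      subst hrs
      simp only [List.cons_append, List.nil_append] at *
      rw [aLoop, scrut4_none _ h1, scrut3_none _ h2,
          scrut2_none _ h3 h4 h5 h6 h7 h8 h9 h10 h11 h12 h13]
      rw [show SINGLE.get? ['p'] = some ['پ'] from by decide]
      rw [bLoop_cons, walk_p rs h3]
      show ['پ'] ++ aLoop rs = ['پ'] ++ bLoop (('p'::rs).drop 1)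
      rw [show (('p'::rs).drop 1) = rs from rfl]
      rw [ih rs (by simp only [List.length_cons] at hl; omega)]
    by_cases h30 : PySem.Chars.startswith l ['q'] = true
    · obtain ⟨rs, hrs⟩ := (PySem.Chars.startswith_iff _ _).mp h30
      subst hrs
      simp only [List.cons_append, List.nil_append] at *
      rw [aLoop, scrut4_none _ h1, scrut3_none _ h2,
          scrut2_none _ h3 h4 h5 h6 h7 h8 h9 h10 h11 h12 h13]
      rw [show SINGLE.get? ['q'] = some ['ک'] from by decide]
      rw [bLoop_cons, walk_q rs h12]
      show ['ک'] ++ aLoop rs = ['ک'] ++ bLoop (('q'::rs).drop 1)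
      rw [show (('q'::rs).drop 1) = rs from rfl]
      rw [ih rs (by simp only [List.length_cons] at hl; omega)]
    by_cases h31 : PySem.Chars.startswith l ['r'] = true
    · obtain ⟨rs, hrs⟩ := (PySem.Chars.startswith_iff _ _).mp h31
      subst hrs
      simp only [List.cons_append, List.nil_append] at *
      rw [aLoop, scrut4_none _ h1, scrut3_none _ h2,
          scrut2_none _ h3 h4 h5 h6 h7 h8 h9 h10 h11 h12 h13]
      rw [show SINGLE.get? ['r'] = some ['ڕ'] from by decide]
      rw [bLoop_cons, walk_r rs]
      show ['ڕ'] ++ aLoop rs = ['ڕ'] ++ bLoop (('r'::rs).drop 1)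
      rw [show (('r'::rs).drop 1) = rs from rfl]
      rw [ih rs (by simp only [List.length_cons] at hl; omega)]
    by_cases h32 : PySem.Chars.startswith l ['s'] = true
    · obtain ⟨rs, hrs⟩ := (PySem.Chars.startswith_iff _ _).mp h32
      subst hrs
      simp only [List.cons_append, List.nil_append] at *
      rw [aLoop, scrut4_none _ h1, scrut3_none _ h2,
          scrut2_none _ h3 h4 h5 h6 h7 h8 h9 h10 h11 h12 h13]
      rw [show SINGLE.get? ['s'] = some ['س'] from by decide]
      rw [bLoop_cons, walk_s rs h4]
      show ['س'] ++ aLoop rs = ['س'] ++ bLoop (('s'::rs).drop 1)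
      rw [show (('s'::rs).drop 1) = rs from rfl]
      rw [ih rs (by simp only [List.length_cons] at hl; omega)]
    by_cases h33 : PySem.Chars.startswith l ['t'] = true
    · obtain ⟨rs, hrs⟩ := (PySem.Chars.startswith_iff _ _).mp h33
      subst hrs
      simp only [List.cons_append, List.nil_append] at *
      rw [aLoop, scrut4_none _ h1, scrut3_none _ h2,
          scrut2_none _ h3 h4 h5 h6 h7 h8 h9 h10 h11 h12 h13]
      rw [show SINGLE.get? ['t'] = some ['ت'] from by decide]
      rw [bLoop_cons, walk_t rs h1 h8]
      show ['ت'] ++ aLoop rs = ['ت'] ++ bLoop (('t'::rs).drop 1)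
      rw [show (('t'::rs).drop 1) = rs from rfl]
      rw [ih rs (by simp only [List.length_cons] at hl; omega)]
    by_cases h34 : PySem.Chars.startswith l ['u'] = true
    · obtain ⟨rs, hrs⟩ := (PySem.Chars.startswith_iff _ _).mp h34
      subst hrs
      simp only [List.cons_append, List.nil_append] at *
      rw [aLoop, scrut4_none _ h1, scrut3_none _ h2,
          scrut2_none _ h3 h4 h5 h6 h7 h8 h9 h10 h11 h12 h13]
      rw [show SINGLE.get? ['u'] = some ['و'] from by decide]
      rw [bLoop_cons, walk_u rs]
      show ['و'] ++ aLoop rs = ['و'] ++ bLoop (('u'::rs).drop 1)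
      rw [show (('u'::rs).drop 1) = rs from rfl]
      rw [ih rs (by simp only [List.length_cons] at hl; omega)]
    by_cases h35 : PySem.Chars.startswith l ['v'] = true
    · obtain ⟨rs, hrs⟩ := (PySem.Chars.startswith_iff _ _).mp h35
      subst hrs
      simp only [List.cons_append, List.nil_append] at *
      rw [aLoop, scrut4_none _ h1, scrut3_none _ h2,
          scrut2_none _ h3 h4 h5 h6 h7 h8 h9 h10 h11 h12 h13]
      rw [show SINGLE.get? ['v'] = some ['ڤ'] from by decide]
      rw [bLoop_cons, walk_v rs]
      show ['ڤ'] ++ aLoop rs = ['ڤ'] ++ bLoop (('v'::rs).drop 1)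
      rw [show (('v'::rs).drop 1) = rs from rfl]
      rw [ih rs (by simp only [List.length_cons] at hl; omega)]
    by_cases h36 : PySem.Chars.startswith l ['w'] = true
    · obtain ⟨rs, hrs⟩ := (PySem.Chars.startswith_iff _ _).mp h36
      subst hrs
      simp only [List.cons_append, List.nil_append] at *
      rw [aLoop, scrut4_none _ h1, scrut3_none _ h2,
          scrut2_none _ h3 h4 h5 h6 h7 h8 h9 h10 h11 h12 h13]
      rw [show SINGLE.get? ['w'] = some ['و'] from by decide]
      rw [bLoop_cons, walk_w rs]
      show ['و'] ++ aLoop rs = ['و'] ++ bLoop (('w'::rs).drop 1)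
      rw [show (('w'::rs).drop 1) = rs from rfl]
      rw [ih rs (by simp only [List.length_cons] at hl; omega)]
    by_cases h37 : PySem.Chars.startswith l ['x'] = true
    · obtain ⟨rs, hrs⟩ := (PySem.Chars.startswith_iff _ _).mp h37
      subst hrs
      simp only [List.cons_append, List.nil_append] at *
      rw [aLoop, scrut4_none _ h1, scrut3_none _ h2,
          scrut2_none _ h3 h4 h5 h6 h7 h8 h9 h10 h11 h12 h13]
      rw [show SINGLE.get? ['x'] = some ['ک', 'س'] from by decide]
      rw [bLoop_cons, walk_x rs]
      show ['ک', 'س'] ++ aLoop rs = ['ک', 'س'] ++ bLoop (('x'::rs).drop 1)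
      rw [show (('x'::rs).drop 1) = rs from rfl]
      rw [ih rs (by simp only [List.length_cons] at hl; omega)]
    by_cases h38 : PySem.Chars.startswith l ['y'] = true
    · obtain ⟨rs, hrs⟩ := (PySem.Chars.startswith_iff _ _).mp h38
      subst hrs
      simp only [List.cons_append, List.nil_append] at *
      rw [aLoop, scrut4_none _ h1, scrut3_none _ h2,
          scrut2_none _ h3 h4 h5 h6 h7 h8 h9 h10 h11 h12 h13]
      rw [show SINGLE.get? ['y'] = some ['ی'] from by decide]
      rw [bLoop_cons, walk_y rs]
      show ['ی'] ++ aLoop rs = ['ی'] ++ bLoop (('y'::rs).drop 1)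
      rw [show (('y'::rs).drop 1) = rs from rfl]
      rw [ih rs (by simp only [List.length_cons] at hl; omega)]
    by_cases h39 : PySem.Chars.startswith l ['z'] = true
    · obtain ⟨rs, hrs⟩ := (PySem.Chars.startswith_iff _ _).mp h39
      subst hrs
      simp only [List.cons_append, List.nil_append] at *
      rw [aLoop, scrut4_none _ h1, scrut3_none _ h2,
          scrut2_none _ h3 h4 h5 h6 h7 h8 h9 h10 h11 h12 h13]
      rw [show SINGLE.get? ['z'] = some ['ز'] from by decide]
      rw [bLoop_cons, walk_z rs h9]
      show ['ز'] ++ aLoop rs = ['ز'] ++ bLoop (('z'::rs).drop 1)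
      rw [show (('z'::rs).drop 1) = rs from rfl]
      rw [ih rs (by simp only [List.length_cons] at hl; omega)]
    cases l with
    | nil => rw [aLoop_nil, bLoop_nil]
    | cons c cs =>
      have hs0 : ('a' : Char) ≠ c := fun e => h14 ((startswith_single_iff c cs _).mpr e)
      have hs1 : ('b' : Char) ≠ c := fun e => h15 ((startswith_single_iff c cs _).mpr e)
      have hs2 : ('c' : Char) ≠ c := fun e => h16 ((startswith_single_iff c cs _).mpr e)
      have hs3 : ('d' : Char) ≠ c := fun e => h17 ((startswith_single_iff c cs _).mpr e)
      have hs4 : ('e' : Char) ≠ c := fun e => h18 ((startswith_single_iff c cs _).mpr e)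
      have hs5 : ('f' : Char) ≠ c := fun e => h19 ((startswith_single_iff c cs _).mpr e)
      have hs6 : ('g' : Char) ≠ c := fun e => h20 ((startswith_single_iff c cs _).mpr e)
      have hs7 : ('h' : Char) ≠ c := fun e => h21 ((startswith_single_iff c cs _).mpr e)
      have hs8 : ('i' : Char) ≠ c := fun e => h22 ((startswith_single_iff c cs _).mpr e)
      have hs9 : ('j' : Char) ≠ c := fun e => h23 ((startswith_single_iff c cs _).mpr e)
      have hs10 : ('k' : Char) ≠ c := fun e => h24 ((startswith_single_iff c cs _).mpr e)
      have hs11 : ('l' : Char) ≠ c := fun e => h25 ((startswith_single_iff c cs _).mpr e)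
      have hs12 : ('m' : Char) ≠ c := fun e => h26 ((startswith_single_iff c cs _).mpr e)
      have hs13 : ('n' : Char) ≠ c := fun e => h27 ((startswith_single_iff c cs _).mpr e)
      have hs14 : ('o' : Char) ≠ c := fun e => h28 ((startswith_single_iff c cs _).mpr e)
      have hs15 : ('p' : Char) ≠ c := fun e => h29 ((startswith_single_iff c cs _).mpr e)
      have hs16 : ('q' : Char) ≠ c := fun e => h30 ((startswith_single_iff c cs _).mpr e)
      have hs17 : ('r' : Char) ≠ c := fun e => h31 ((startswith_single_iff c cs _).mpr e)
      have hs18 : ('s' : Char) ≠ c := fun e => h32 ((startswith_single_iff c cs _).mpr e)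
      have hs19 : ('t' : Char) ≠ c := fun e => h33 ((startswith_single_iff c cs _).mpr e)
      have hs20 : ('u' : Char) ≠ c := fun e => h34 ((startswith_single_iff c cs _).mpr e)
      have hs21 : ('v' : Char) ≠ c := fun e => h35 ((startswith_single_iff c cs _).mpr e)
      have hs22 : ('w' : Char) ≠ c := fun e => h36 ((startswith_single_iff c cs _).mpr e)
      have hs23 : ('x' : Char) ≠ c := fun e => h37 ((startswith_single_iff c cs _).mpr e)
      have hs24 : ('y' : Char) ≠ c := fun e => h38 ((startswith_single_iff c cs _).mpr e)
      have hs25 : ('z' : Char) ≠ c := fun e => h39 ((startswith_single_iff c cs _).mpr e)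
      rw [aLoop, scrut4_none _ h1, scrut3_none _ h2,
          scrut2_none _ h3 h4 h5 h6 h7 h8 h9 h10 h11 h12 h13,
          single_none c hs0 hs1 hs2 hs3 hs4 hs5 hs6 hs7 hs8 hs9 hs10 hs11 hs12 hs13 hs14 hs15 hs16 hs17 hs18 hs19 hs20 hs21 hs22 hs23 hs24 hs25]
      rw [bLoop_cons, walk_default c cs hs0 hs1 hs2 hs3 hs4 hs5 hs6 hs7 hs8 hs9 hs10 hs11 hs12 hs13 hs14 hs15 hs16 hs17 hs18 hs19 hs20 hs21 hs22 hs23 hs24 hs25]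
      show c :: aLoop cs = c :: bLoop cs
      rw [ih cs (by simp only [List.length_cons] at hl; omega)]

theorem loop_eq (l : List Char) : aLoop l = bLoop l := loop_eq_aux l.length l le_rfl

-- ===== VERDICT (by name: the statement is the Claim_ definition above) =====
theorem fallback_transliterate_py_spec : Claim_equal_fallback_transliterate_py := by
  intro word _
  unfold Spec_fallback_transliterate_py fallback_transliterate_py fallback_transliterate_py_alt
  simp only [loop_eq]
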